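-- pv_equiv track=rewrite | github.com/kauanfeelipe/aprendizado-pratica-faculdade | ESTRUTURA-01-PYTHON/algoritmos_pilha01.py | intercalarPilhasordemCrescente
-- ===== SOURCE A (Python) =====
-- def push(p,v):
--     p.append(v)
--
-- def pop(p):
--     return p.pop()
--
-- def vazia(p):
--     return False if p else True
--
-- def intercalarPilhasordemCrescente(p1,p2,p3):
--     aux1 = []
--     aux2 = []
--
--     while not vazia(p1):
--         valor = pop(p1)
--         push(aux1,valor)
--
--     while not vazia(p2):
--         valor = pop(p2)
--         push(aux2,valor)
--
--     while not vazia(aux1) and not vazia(aux2):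
--         valor1 = pop(aux1)
--         valor2 = pop(aux2)
--         if valor1 < valor2:
--             push(p3,valor1)
--             push(aux2,valor2)
--             push(p1,valor1)
--         else:
--             push(p3,valor2)
--             push(aux1,valor1)
--             push(p2,valor2)
--
--     while not vazia(aux1):
--         valor = pop(aux1)
--         push(p1,valor)
--         push(p3,valor)
--
--     while not vazia(aux2):
--         valor = pop(aux2)
--         push(p2,valor)
--         push(p3,valor)
--
--     return p3
-- ===== SOURCE B (Python) =====
-- def intercalarPilhasordemCrescente(p1, p2, p3):
--     # Single-pass two-pointer merge; reads p1/p2 without touching them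
--     # (A restores them anyway) and extends p3, like A.
--     i = j = 0
--     n1, n2 = len(p1), len(p2)
--     while i < n1 and j < n2:
--         if p1[i] < p2[j]:
--             p3.append(p1[i])
--             i += 1
--         else:
--             p3.append(p2[j])
--             j += 1
--     p3.extend(p1[i:])
--     p3.extend(p2[j:])
--     return p3
-- ===== Notes on version B (the rewrite author's own statement) =====
-- stated objective: simpler
-- what changed: Replaces the four auxiliary-stack reverse/restore loops with a single-pass two-pointer merge over p1 and p2 that appends directly to p3 and never mutates p1 or p2 (A restores them to their original state anyway).
import Mathlib
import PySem

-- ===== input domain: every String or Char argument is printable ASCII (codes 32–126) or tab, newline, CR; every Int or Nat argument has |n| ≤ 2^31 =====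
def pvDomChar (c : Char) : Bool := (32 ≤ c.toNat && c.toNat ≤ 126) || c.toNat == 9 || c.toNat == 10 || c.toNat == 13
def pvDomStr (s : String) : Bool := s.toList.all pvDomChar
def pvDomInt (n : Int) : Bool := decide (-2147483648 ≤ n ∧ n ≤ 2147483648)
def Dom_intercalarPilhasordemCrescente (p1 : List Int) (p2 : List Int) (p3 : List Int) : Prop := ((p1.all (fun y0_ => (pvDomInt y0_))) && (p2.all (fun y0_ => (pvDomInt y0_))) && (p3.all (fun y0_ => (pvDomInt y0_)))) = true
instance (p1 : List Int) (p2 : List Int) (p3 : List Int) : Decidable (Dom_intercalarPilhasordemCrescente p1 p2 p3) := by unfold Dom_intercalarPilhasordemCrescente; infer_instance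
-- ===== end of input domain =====

-- B replaces A's four auxiliary-stack reverse/restore loops by a single-pass two-pointer
-- merge that appends straight to p3; equivalence is about the return value (A also mutates
-- p1/p2 in place but restores them, and both extend p3 the same way).

-- ===== PORT A =====
-- 'while not vazia(p): push(aux, pop(p))' — pop takes the last element
def pvPopAll (p aux : List Int) : List Int × List Int :=
  if h : p = [] then (p, aux)
  else pvPopAll p.dropLast (aux ++ [p.getLast h])
termination_by p.length
decreasing_by simp [List.length_dropLast]; exact List.length_pos_iff.mpr h

-- the central 'while not vazia(aux1) and not vazia(aux2)' loop, state (p1,p2,p3,aux1,aux2)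
def pvMergeLoop (p1 p2 p3 aux1 aux2 : List Int) :
    List Int × List Int × List Int × List Int × List Int :=
  if h : aux1 ≠ [] ∧ aux2 ≠ [] then
    let valor1 := aux1.getLast h.1
    let valor2 := aux2.getLast h.2
    if valor1 < valor2 then
      pvMergeLoop (p1 ++ [valor1]) p2 (p3 ++ [valor1]) aux1.dropLast (aux2.dropLast ++ [valor2])
    else
      pvMergeLoop p1 (p2 ++ [valor2]) (p3 ++ [valor2]) (aux1.dropLast ++ [valor1]) aux2.dropLast
  else (p1, p2, p3, aux1, aux2)
termination_by aux1.length + aux2.length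
decreasing_by
  · have h1 := List.length_pos_iff.mpr h.1
    have h2 := List.length_pos_iff.mpr h.2
    simp [List.length_dropLast]; omega
  · have h1 := List.length_pos_iff.mpr h.1
    have h2 := List.length_pos_iff.mpr h.2
    simp [List.length_dropLast]; omega

-- 'while not vazia(aux): v = pop(aux); push(p, v); push(p3, v)'
def pvDrain (p aux p3 : List Int) : List Int × List Int :=
  if h : aux = [] then (p, p3)
  else pvDrain (p ++ [aux.getLast h]) aux.dropLast (p3 ++ [aux.getLast h])
termination_by aux.length
decreasing_by simp [List.length_dropLast]; exact List.length_pos_iff.mpr h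

def intercalarPilhasordemCrescente (p1 : List Int) (p2 : List Int) (p3 : List Int) : List Int :=
  let s1 := pvPopAll p1 []
  let s2 := pvPopAll p2 []
  let m := pvMergeLoop s1.1 s2.1 p3 s1.2 s2.2
  let d1 := pvDrain m.1 m.2.2.2.1 m.2.2.1
  let d2 := pvDrain m.2.1 m.2.2.2.2 d1.2
  d2.2

-- ===== PORT B =====
-- two-pointer merge: consume the fronts of p1 and p2, appending the smaller (ties → p2) to p3
def pvAltMerge (xs ys acc : List Int) : List Int :=
  match xs, ys with
  | x :: xs', y :: ys' =>
      if x < y then pvAltMerge xs' (y :: ys') (acc ++ [x])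
      else pvAltMerge (x :: xs') ys' (acc ++ [y])
  | xs, ys => acc ++ xs ++ ys
termination_by xs.length + ys.length

def intercalarPilhasordemCrescente_alt (p1 : List Int) (p2 : List Int) (p3 : List Int) : List Int :=
  pvAltMerge p1 p2 p3

-- ===== PRECONDITION & SPEC =====
def Spec_intercalarPilhasordemCrescente (p1 : List Int) (p2 : List Int) (p3 : List Int) (out : List Int) : Prop := out = intercalarPilhasordemCrescente_alt p1 p2 p3
instance (p1 : List Int) (p2 : List Int) (p3 : List Int) (out : List Int) : Decidable (Spec_intercalarPilhasordemCrescente p1 p2 p3 out) := by unfold Spec_intercalarPilhasordemCrescente; infer_instance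

-- ===== CLAIM (what is proved, stated in full; the proofs are below) =====
def Claim_equal_intercalarPilhasordemCrescente : Prop := ∀ (p1 : List Int) (p2 : List Int) (p3 : List Int), Dom_intercalarPilhasordemCrescente p1 p2 p3 → Spec_intercalarPilhasordemCrescente p1 p2 p3 (intercalarPilhasordemCrescente p1 p2 p3)

-- ===== LEMMAS AND PROOFS =====

lemma pvPopAll_eq (p aux : List Int) : pvPopAll p aux = ([], aux ++ p.reverse) := by
  induction p using List.reverseRecOn generalizing aux with
  | nil => simp [pvPopAll]
  | append_singleton l x ih =>
      have h : l ++ [x] ≠ [] := by simp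
      rw [pvPopAll, dif_neg h]
      simp only [List.getLast_append, List.dropLast_concat]
      rw [ih]
      simp

lemma pvDrain_snd (p aux p3 : List Int) : (pvDrain p aux p3).2 = p3 ++ aux.reverse := by
  induction aux using List.reverseRecOn generalizing p p3 with
  | nil => simp [pvDrain]
  | append_singleton l x ih =>
      have h : l ++ [x] ≠ [] := by simp
      rw [pvDrain, dif_neg h]
      simp only [List.getLast_append, List.dropLast_concat]
      rw [ih]
      simp

lemma getLast_reverse_cons (x : Int) (l : List Int) (h : (x :: l).reverse ≠ []) :
    (x :: l).reverse.getLast h = x := by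
  simp

lemma dropLast_reverse_cons (x : Int) (l : List Int) :
    (x :: l).reverse.dropLast = l.reverse := by
  simp

lemma key (a b : List Int) : ∀ (p1 p2 p3 : List Int),
    (let m := pvMergeLoop p1 p2 p3 a.reverse b.reverse
     (pvDrain m.2.1 m.2.2.2.2 (pvDrain m.1 m.2.2.2.1 m.2.2.1).2).2) = pvAltMerge a b p3 := by
  induction a generalizing b with
  | nil =>
      intro p1 p2 p3
      simp only [List.reverse_nil]
      rw [pvMergeLoop]
      simp [pvDrain_snd, pvAltMerge]
  | cons x a' iha =>
      induction b with
      | nil =>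
          intro p1 p2 p3
          rw [pvMergeLoop]
          simp [pvDrain_snd, pvAltMerge]
      | cons y b' ihb =>
          intro p1 p2 p3
          have hx : (x :: a').reverse ≠ [] := by simp
          have hy : (y :: b').reverse ≠ [] := by simp
          rw [pvMergeLoop, dif_pos ⟨hx, hy⟩]
          simp only [getLast_reverse_cons, dropLast_reverse_cons]
          by_cases hlt : x < y
          · rw [if_pos hlt]
            have : b'.reverse ++ [y] = (y :: b').reverse := by simp
            rw [this, iha (y :: b') (p1 ++ [x]) p2 (p3 ++ [x])]
            rw [pvAltMerge, if_pos hlt]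
          · rw [if_neg hlt]
            have : a'.reverse ++ [x] = (x :: a').reverse := by simp
            rw [this, ihb p1 (p2 ++ [y]) (p3 ++ [y])]
            rw [pvAltMerge, if_neg hlt]

-- ===== VERDICT (by name: the statement is the Claim_ definition above) =====
theorem intercalarPilhasordemCrescente_spec : Claim_equal_intercalarPilhasordemCrescente := by
  intro p1 p2 p3 _
  show intercalarPilhasordemCrescente p1 p2 p3 = intercalarPilhasordemCrescente_alt p1 p2 p3
  unfold intercalarPilhasordemCrescente intercalarPilhasordemCrescente_alt
  simp only [pvPopAll_eq, List.nil_append]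
  exact key p1 p2 [] [] p3
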